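-- pv_equiv track=rewrite | github.com/zyasen95/TDMSRA | fix_questions.py | markdown_bullets_to_html
-- ===== SOURCE A (Python) =====
-- def markdown_bullets_to_html(text):
--     """Convert markdown bullet points to HTML <ul><li> format."""
--     if not text or not text.strip():
--         return ""
--
--     lines = text.strip().split('\n')
--     result = []
--     in_list = False
--
--     for line in lines:
--         stripped = line.strip()
--
--         # Check if it's a bullet point (starts with - or *)
--         if stripped.startswith('- ') or stripped.startswith('* '):
--             if not in_list:
--                 result.append('<ul>')
--                 in_list = True
--             # Remove the bullet marker and wrap in <li>
--             content = stripped[2:].strip()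
--             result.append(f'<li>{content}</li>')
--         else:
--             # Non-bullet line
--             if in_list:
--                 result.append('</ul>')
--                 in_list = False
--             if stripped:  # Only add non-empty lines
--                 result.append(stripped)
--
--     # Close list if still open
--     if in_list:
--         result.append('</ul>')
--
--     return '\n'.join(result)
-- ===== SOURCE B (Python) =====
-- def markdown_bullets_to_html(text):
--     """Convert markdown bullet points to HTML <ul><li> format."""
--     if not text or not text.strip():
--         return ""
--     lines = [l.strip() for l in text.strip().split('\n')]
--     return '\n'.join(_render(lines))
--
--
-- def _is_bullet(s):
--     return s.startswith('- ') or s.startswith('* ')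
--
--
-- def _render(lines):
--     """Run-based recursion: a maximal bullet run becomes one <ul> block."""
--     if not lines:
--         return []
--     if _is_bullet(lines[0]):
--         k = 0
--         while k < len(lines) and _is_bullet(lines[k]):
--             k += 1
--         return (['<ul>']
--                 + [f'<li>{s[2:].strip()}</li>' for s in lines[:k]]
--                 + ['</ul>']
--                 + _render(lines[k:]))
--     head = [lines[0]] if lines[0] else []
--     return head + _render(lines[1:])
-- ===== Notes on version B (the rewrite author's own statement) =====
-- stated objective: alternative
-- what changed: Replaces A's single stateful pass with an in_list flag by a run-based recursion: lines are pre-stripped once, then each maximal run of bullet lines is emitted as one <ul>...</ul> block and non-bullet lines are handled one at a time.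
import Mathlib
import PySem

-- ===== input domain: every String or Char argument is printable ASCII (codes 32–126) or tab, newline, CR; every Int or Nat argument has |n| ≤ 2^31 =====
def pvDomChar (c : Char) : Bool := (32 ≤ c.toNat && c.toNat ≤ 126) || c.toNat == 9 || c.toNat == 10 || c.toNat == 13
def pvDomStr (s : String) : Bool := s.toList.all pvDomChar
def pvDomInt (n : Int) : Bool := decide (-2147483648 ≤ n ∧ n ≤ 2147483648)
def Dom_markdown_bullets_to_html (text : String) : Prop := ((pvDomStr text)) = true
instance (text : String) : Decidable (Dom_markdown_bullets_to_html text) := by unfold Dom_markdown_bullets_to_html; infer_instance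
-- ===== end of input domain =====

-- B replaces A's single stateful pass (in_list flag) by a run-based recursion over pre-stripped lines
-- (each maximal bullet run becomes one <ul> block); alternative decomposition, same cost.

-- ===== PORT A =====
-- A's loop: state = (accumulated result lines, in_list flag); strips each line inside the loop.
def pvA_loop : List String → List String → Bool → List String
  | [], res, inl => if inl then res ++ ["</ul>"] else res
  | l :: rest, res, inl =>
    let s := PySem.Str.strip l
    if PySem.Str.startswith s "- " || PySem.Str.startswith s "* " then
      let res1 := if !inl then res ++ ["<ul>"] else res
      pvA_loop rest (res1 ++ ["<li>" ++ PySem.Str.strip (PySem.Str.slice s (some 2) none) ++ "</li>"]) true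
    else
      let res1 := if inl then res ++ ["</ul>"] else res
      pvA_loop rest (if s ≠ "" then res1 ++ [s] else res1) false

def markdown_bullets_to_html (text : String) : String :=
  if text = "" || PySem.Str.strip text = "" then ""
  else
    PySem.Str.join "\n"
      (pvA_loop ((PySem.Str.split? (PySem.Str.strip text) "\n").getD []) [] false)

-- ===== PORT B =====
def pvB_isBullet (s : String) : Bool :=
  PySem.Str.startswith s "- " || PySem.Str.startswith s "* "

def pvB_li (s : String) : String :=
  "<li>" ++ PySem.Str.strip (PySem.Str.slice s (some 2) none) ++ "</li>"

-- run-based recursion over already-stripped lines (the while loop finding the run = takeWhile/dropWhile)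
def pvB_render : List String → List String
  | [] => []
  | s :: rest =>
    if pvB_isBullet s then
      "<ul>" :: (((s :: rest).takeWhile pvB_isBullet).map pvB_li
        ++ ("</ul>" :: pvB_render ((s :: rest).dropWhile pvB_isBullet)))
    else (if s ≠ "" then [s] else []) ++ pvB_render rest
termination_by l => l.length
decreasing_by
  · simp only [List.dropWhile_cons_of_pos ‹pvB_isBullet s = true›]
    exact Nat.lt_succ_of_le (List.length_dropWhile_le _ _)
  · simp

def markdown_bullets_to_html_alt (text : String) : String :=
  if text = "" || PySem.Str.strip text = "" then ""
  else
    PySem.Str.join "\n"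
      (pvB_render (((PySem.Str.split? (PySem.Str.strip text) "\n").getD []).map PySem.Str.strip))

-- ===== PRECONDITION & SPEC =====
def Spec_markdown_bullets_to_html (text : String) (out : String) : Prop := out = markdown_bullets_to_html_alt text
instance (text : String) (out : String) : Decidable (Spec_markdown_bullets_to_html text out) := by unfold Spec_markdown_bullets_to_html; infer_instance

-- ===== CLAIM (what is proved, stated in full; the proofs are below) =====
def Claim_equal_markdown_bullets_to_html : Prop := ∀ (text : String), Dom_markdown_bullets_to_html text → Spec_markdown_bullets_to_html text (markdown_bullets_to_html text)

-- ===== LEMMAS AND PROOFS =====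

-- A's loop from state (res, false) produces res ++ B's rendering; from (res, true) it first
-- finishes the open bullet run (the takeWhile prefix as <li>s, then </ul>) and continues as B.
theorem pvA_loop_spec (lines : List String) : ∀ (res : List String),
    pvA_loop lines res false = res ++ pvB_render (lines.map PySem.Str.strip) ∧
    pvA_loop lines res true =
      res ++ ((lines.map PySem.Str.strip).takeWhile pvB_isBullet).map pvB_li
          ++ ["</ul>"] ++ pvB_render ((lines.map PySem.Str.strip).dropWhile pvB_isBullet) := by
  induction lines with
  | nil => intro res; simp [pvA_loop, pvB_render]
  | cons l rest ih =>
    intro res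
    by_cases hb : pvB_isBullet (PySem.Str.strip l) = true
    · have h' : (PySem.Str.startswith (PySem.Str.strip l) "- "
          || PySem.Str.startswith (PySem.Str.strip l) "* ") = true := hb
      constructor
      · rw [show pvA_loop (l :: rest) res false
              = pvA_loop rest ((res ++ ["<ul>"]) ++ [pvB_li (PySem.Str.strip l)]) true by
            simp only [pvA_loop, pvB_li]; rw [h']; simp]
        rw [(ih _).2]
        simp [List.map_cons, pvB_render, List.takeWhile_cons_of_pos hb,
          List.dropWhile_cons_of_pos hb, hb]
      · rw [show pvA_loop (l :: rest) res true
              = pvA_loop rest (res ++ [pvB_li (PySem.Str.strip l)]) true by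
            simp only [pvA_loop, pvB_li]; rw [h']; simp]
        rw [(ih _).2]
        simp [List.map_cons, List.takeWhile_cons_of_pos hb, List.dropWhile_cons_of_pos hb]
    · have h' : (PySem.Str.startswith (PySem.Str.strip l) "- "
          || PySem.Str.startswith (PySem.Str.strip l) "* ") = false := by
        simpa [pvB_isBullet] using hb
      constructor
      · rw [show pvA_loop (l :: rest) res false
              = pvA_loop rest (res ++ (if PySem.Str.strip l ≠ "" then [PySem.Str.strip l] else [])) false by
            simp only [pvA_loop]; rw [h']
            by_cases hs : PySem.Str.strip l = "" <;> simp [hs]]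
        rw [(ih _).1]
        simp [List.map_cons, pvB_render, hb]
      · rw [show pvA_loop (l :: rest) res true
              = pvA_loop rest ((res ++ ["</ul>"]) ++ (if PySem.Str.strip l ≠ "" then [PySem.Str.strip l] else [])) false by
            simp only [pvA_loop]; rw [h']
            by_cases hs : PySem.Str.strip l = "" <;> simp [hs]]
        rw [(ih _).1]
        simp [List.map_cons, List.takeWhile_cons_of_neg hb, List.dropWhile_cons_of_neg hb,
          pvB_render, hb]

-- ===== VERDICT (by name: the statement is the Claim_ definition above) =====
theorem markdown_bullets_to_html_spec : Claim_equal_markdown_bullets_to_html := by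
  intro text _
  unfold Spec_markdown_bullets_to_html markdown_bullets_to_html markdown_bullets_to_html_alt
  split
  · rfl
  · rw [(pvA_loop_spec _ []).1]; simp
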